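-- pv_equiv track=rewrite | github.com/TariniS/calcudoku_Project3_CS | Project 3/solverFuncs.py | check_columns_valid
-- ===== SOURCE A (Python) =====
-- def containsDuplicates(listInPuzzle):
--     #checks if the list contains duplicates.
--     #calling this method in check rows and check columns
--     duplicateCount=0
--     for item in listInPuzzle:
--         if item!=0:
--             duplicateCount = listInPuzzle.count(item)
--             if duplicateCount>1:
--                 return True
--     return False
--
-- def checkIfNumIsFrom1ToN(listInPuzzle):
--     #checks if the list contains numbers only from 0-N
--     #calling this method in check rows and check columns
--     for i in range(len(listInPuzzle)):
--         if ((listInPuzzle[i]<0)or(listInPuzzle[i]>5)):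
--             return False
--     return True
--
-- def check_columns_valid(puzzle):
--     #takes a list of lists, checks if every column has no repeats
--     #and only values 1-n
--     #[
--     # [0,0,0,0,0]
--     # [1,3,4,5,6]
--     # [2,3,4,5,6]
--     # [3,4,5,6,7]
--     #]
--     # [[0,1,2,3]
--     #  [0,3,3,4]
--     #  [0,4,4,5]
--     a=[]
--     array0=[]
--     array1=[]
--     array2=[]
--     array3=[]
--     array4=[]
--     for i in range(5):
--         if(i==0):
--             for j in range(5):
--                 array0.append(puzzle[j][0])
--         elif(i==1):
--             for k in range(5):
--                 array1.append(puzzle[k][1])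
--         elif(i==2):
--             for p in range(5):
--                 array2.append(puzzle[p][2])
--         elif(i==3):
--             for e in range(5):
--                 array3.append(puzzle[e][3])
--         else:
--             for q in range(5):
--                 array4.append(puzzle[q][4])
--     a.append(array0)
--     a.append(array1)
--     a.append(array2)
--     a.append(array3)
--     a.append(array4)
--     #above code was converting the columns into rows using for loops
--     for i in range(5):
--         if(i==0):
--             a1=(containsDuplicates(a[i])==False) and (checkIfNumIsFrom1ToN(a[i])==True)
--         if(i==1):
--             a2=(containsDuplicates(a[i])==False) and (checkIfNumIsFrom1ToN(a[i])==True)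
--         if(i==2):
--             a3=(containsDuplicates(a[i])==False) and (checkIfNumIsFrom1ToN(a[i])==True)
--         if(i==3):
--             a4=(containsDuplicates(a[i])==False) and (checkIfNumIsFrom1ToN(a[i])==True)
--         if(i==4):
--             a5=(containsDuplicates(a[i])==False) and (checkIfNumIsFrom1ToN(a[i])==True)
--     #using the same code for check_rows, creating a boolena variable
--     #return true only if all of them are ture
--     return (a1 and a2 and a3 and a4 and a5)
-- ===== SOURCE B (Python) =====
-- def check_columns_valid(puzzle):
--     # Sort each column: the range check reduces to the two sorted extremes and the
--     # duplicate check to one adjacent-pair scan (equal zeros are exempt).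
--     for c in range(5):
--         s = sorted(puzzle[r][c] for r in range(5))
--         if s[0] < 0 or s[4] > 5:
--             return False
--         for i in range(4):
--             if s[i] != 0 and s[i] == s[i + 1]:
--                 return False
--     return True
-- ===== Notes on version B (the rewrite author's own statement) =====
-- stated objective: alternative
-- what changed: Replaces A's build-all-five-columns-then-AND-five-booleans structure (per-element list.count duplicate scans and an element-wise range loop) by a sort-based algorithm: each column is sorted, the range check becomes two comparisons on the sorted extremes s[0]/s[4], and the duplicate check becomes one adjacent-pair scan of the sorted column (equal zeros exempt), short-circuiting on the first bad column.
import Mathlib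
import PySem

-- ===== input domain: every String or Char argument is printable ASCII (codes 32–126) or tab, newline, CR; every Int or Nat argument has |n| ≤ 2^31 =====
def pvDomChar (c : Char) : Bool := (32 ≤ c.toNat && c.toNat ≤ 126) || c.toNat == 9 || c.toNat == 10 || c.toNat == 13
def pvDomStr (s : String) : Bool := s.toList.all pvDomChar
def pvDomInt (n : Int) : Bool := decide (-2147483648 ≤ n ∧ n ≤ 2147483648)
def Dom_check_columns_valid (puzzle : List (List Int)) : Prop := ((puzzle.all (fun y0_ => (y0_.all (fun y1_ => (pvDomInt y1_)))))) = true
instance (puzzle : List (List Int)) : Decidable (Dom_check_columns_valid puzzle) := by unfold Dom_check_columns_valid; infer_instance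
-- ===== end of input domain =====

-- B sorts each column and checks range on the sorted extremes and duplicates by one
-- adjacent-pair scan, instead of A's build-all-columns-then-AND-five-booleans with
-- per-element count scans; objective: alternative.

-- ===== PORT A =====
-- puzzle[j][c]: total form via pyGetD; exact under Pre_ (both indices in range there)
def pvCellA (puzzle : List (List Int)) (j c : Int) : Int :=
  PySem.List.pyGetD (PySem.List.pyGetD puzzle j []) c 0

-- 'for j in range(5): arr.append(puzzle[j][c])'
def pvColA (puzzle : List (List Int)) (c : Int) : List Int :=
  (PySem.List.pyRange 0 5 1).foldl (fun acc j => acc ++ [pvCellA puzzle j c]) []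

-- containsDuplicates: 'for item in list: if item != 0: if list.count(item) > 1: return True'
def pvCdGo (xs : List Int) : List Int → Bool
  | [] => false
  | x :: rest =>
    if x ≠ 0 then
      (if PySem.List.count xs x > 1 then true else pvCdGo xs rest)
    else pvCdGo xs rest

def containsDuplicates (listInPuzzle : List Int) : Bool := pvCdGo listInPuzzle listInPuzzle

-- checkIfNumIsFrom1ToN: 'for i in range(len(l)): if l[i] < 0 or l[i] > 5: return False'
-- (the index loop visits the elements in order, ported as recursion over the list)
def checkIfNumIsFrom1ToN : List Int → Bool
  | [] => true
  | x :: rest => if x < 0 ∨ x > 5 then false else checkIfNumIsFrom1ToN rest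

def check_columns_valid (puzzle : List (List Int)) : Bool :=
  let array0 := pvColA puzzle 0
  let array1 := pvColA puzzle 1
  let array2 := pvColA puzzle 2
  let array3 := pvColA puzzle 3
  let array4 := pvColA puzzle 4
  let a : List (List Int) := [] ++ [array0] ++ [array1] ++ [array2] ++ [array3] ++ [array4]
  let a1 := (containsDuplicates (PySem.List.pyGetD a 0 []) == false) &&
            (checkIfNumIsFrom1ToN (PySem.List.pyGetD a 0 []) == true)
  let a2 := (containsDuplicates (PySem.List.pyGetD a 1 []) == false) &&
            (checkIfNumIsFrom1ToN (PySem.List.pyGetD a 1 []) == true)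
  let a3 := (containsDuplicates (PySem.List.pyGetD a 2 []) == false) &&
            (checkIfNumIsFrom1ToN (PySem.List.pyGetD a 2 []) == true)
  let a4 := (containsDuplicates (PySem.List.pyGetD a 3 []) == false) &&
            (checkIfNumIsFrom1ToN (PySem.List.pyGetD a 3 []) == true)
  let a5 := (containsDuplicates (PySem.List.pyGetD a 4 []) == false) &&
            (checkIfNumIsFrom1ToN (PySem.List.pyGetD a 4 []) == true)
  a1 && a2 && a3 && a4 && a5

-- ===== PORT B =====
-- 'for i in range(4): if s[i] != 0 and s[i] == s[i+1]: return True-ish' — the index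
-- loop over adjacent pairs of s, ported as recursion over adjacent pairs
def pvAdjB : List Int → Bool
  | x :: y :: rest => if x ≠ 0 ∧ x = y then true else pvAdjB (y :: rest)
  | _ => false

-- 'for c in range(5): s = sorted(puzzle[r][c] for r in range(5)); two checks; early return'
def pvBGo (puzzle : List (List Int)) : List Int → Bool
  | [] => true
  | c :: cs =>
    let s := PySem.List.sorted
      ((PySem.List.pyRange 0 5 1).map
        (fun r => PySem.List.pyGetD (PySem.List.pyGetD puzzle r []) c 0)) (fun v => v) false
    if PySem.List.pyGetD s 0 0 < 0 ∨ PySem.List.pyGetD s 4 0 > 5 then false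
    else if pvAdjB s then false
    else pvBGo puzzle cs

def check_columns_valid_alt (puzzle : List (List Int)) : Bool :=
  pvBGo puzzle (PySem.List.pyRange 0 5 1)

-- ===== PRECONDITION & SPEC =====
-- Pre_ excludes exactly the inputs where A raises IndexError: fewer than 5 rows,
-- or one of the first 5 rows shorter than 5.
def Pre_check_columns_valid (puzzle : List (List Int)) : Prop :=
  5 ≤ puzzle.length ∧ ∀ row ∈ puzzle.take 5, 5 ≤ row.length
instance (puzzle : List (List Int)) : Decidable (Pre_check_columns_valid puzzle) := by
  unfold Pre_check_columns_valid; infer_instance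

def pvWitness_check_columns_valid : List (List Int) :=
  [[1,2,3,4,5],[2,3,4,5,1],[3,4,5,1,2],[4,5,1,2,3],[5,1,2,3,4]]

def Spec_check_columns_valid (puzzle : List (List Int)) (out : Bool) : Prop := out = check_columns_valid_alt puzzle
instance (puzzle : List (List Int)) (out : Bool) : Decidable (Spec_check_columns_valid puzzle out) := by unfold Spec_check_columns_valid; infer_instance

-- ===== CLAIM (what is proved, stated in full; the proofs are below) =====
def Claim_equal_check_columns_valid : Prop := ∀ (puzzle : List (List Int)), Dom_check_columns_valid puzzle → Pre_check_columns_valid puzzle → Spec_check_columns_valid puzzle (check_columns_valid puzzle)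

-- ===== LEMMAS AND PROOFS =====

-- A's element-by-element count scan detects exactly a repeated nonzero element
theorem pvCdGo_eq_any (xs : List Int) (l : List Int) :
    pvCdGo xs l = l.any (fun x => decide (x ≠ 0) && decide (PySem.List.count xs x > 1)) := by
  induction l with
  | nil => rfl
  | cons x rest ih =>
    by_cases hx : x = 0 <;> by_cases hc : PySem.List.count xs x > 1 <;>
      simp [pvCdGo, hx, ih]

-- A's duplicate flag characterised: some nonzero value occurs at least twice
theorem cd_iff (l : List Int) :
    containsDuplicates l = true ↔ ∃ x, x ≠ 0 ∧ 1 < l.count x := by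
  unfold containsDuplicates
  rw [pvCdGo_eq_any, List.any_eq_true]
  constructor
  · rintro ⟨x, _, hx⟩
    simp [PySem.List.count_eq] at hx
    exact ⟨x, hx.1, hx.2⟩
  · rintro ⟨x, hx0, hcnt⟩
    have hmem : x ∈ l := List.count_pos_iff.mp (by omega)
    exact ⟨x, hmem, by simp [PySem.List.count_eq, hx0, hcnt]⟩

-- A's range loop characterised
theorem chk_iff (l : List Int) :
    checkIfNumIsFrom1ToN l = true ↔ ∀ v ∈ l, ¬(v < 0 ∨ v > 5) := by
  induction l with
  | nil => simp [checkIfNumIsFrom1ToN]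
  | cons x rest ih =>
    by_cases h : x < 0 ∨ x > 5
    · rw [checkIfNumIsFrom1ToN, if_pos h]
      simp only [Bool.false_eq_true, false_iff]
      intro hall
      exact hall x List.mem_cons_self h
    · rw [checkIfNumIsFrom1ToN, if_neg h, ih]
      constructor
      · intro hall v hv
        rcases List.mem_cons.mp hv with rfl | hm
        · exact h
        · exact hall v hm
      · intro hall v hv
        exact hall v (List.mem_cons_of_mem x hv)

-- B's adjacent-pair scan on a ≤-sorted list finds exactly a repeated nonzero value
theorem adj_iff (s : List Int) (hpw : s.Pairwise (· ≤ ·)) :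
    pvAdjB s = true ↔ ∃ x, x ≠ 0 ∧ 1 < s.count x := by
  induction s with
  | nil => simp [pvAdjB]
  | cons x t ih =>
    rw [List.pairwise_cons] at hpw
    obtain ⟨hxle, hpt⟩ := hpw
    constructor
    · intro h
      match t, hpt, h with
      | y :: r, hpt, h =>
        by_cases hcond : x ≠ 0 ∧ x = y
        · obtain ⟨hx0, rfl⟩ := hcond
          exact ⟨x, hx0, by rw [List.count_cons_self, List.count_cons_self]; omega⟩
        · rw [pvAdjB, if_neg hcond] at h
          obtain ⟨z, hz0, hzc⟩ := (ih hpt).mp h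
          exact ⟨z, hz0, lt_of_lt_of_le hzc ((List.sublist_cons_self x (y :: r)).count_le z)⟩
    · rintro ⟨z, hz0, hzc⟩
      by_cases hzx : z = x
      · subst hzx
        have hcz : 0 < t.count z := by rw [List.count_cons_self] at hzc; omega
        have hmem : z ∈ t := List.count_pos_iff.mp hcz
        match t, hmem, hxle, hpt with
        | y :: r, hmem, hxle, hpt =>
          have hyz : y ≤ z := by
            rw [List.pairwise_cons] at hpt
            rcases List.mem_cons.mp hmem with rfl | hr
            · exact le_refl _
            · exact hpt.1 z hr
          have hzy : z ≤ y := hxle y List.mem_cons_self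
          rw [pvAdjB, if_pos ⟨hz0, le_antisymm hzy hyz⟩]
      · have hct : 1 < t.count z := by rw [List.count_cons_of_ne (fun h => hzx h.symm)] at hzc; exact hzc
        have htadj : pvAdjB t = true := (ih hpt).mpr ⟨z, hz0, hct⟩
        have hmem : z ∈ t := List.count_pos_iff.mp (by omega)
        match t, hmem, htadj with
        | y :: r, _, htadj =>
          rw [pvAdjB]
          split
          · rfl
          · exact htadj

-- per-column agreement: A's conjunction for one column = B's two checks on the sorted column
theorem col_agree (v0 v1 v2 v3 v4 : Int) :
    ((containsDuplicates [v0, v1, v2, v3, v4] == false) &&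
     (checkIfNumIsFrom1ToN [v0, v1, v2, v3, v4] == true)) =
      ((!decide (PySem.List.pyGetD (PySem.List.sorted [v0, v1, v2, v3, v4] (fun v => v) false) 0 0 < 0 ∨
                 PySem.List.pyGetD (PySem.List.sorted [v0, v1, v2, v3, v4] (fun v => v) false) 4 0 > 5)) &&
       (!pvAdjB (PySem.List.sorted [v0, v1, v2, v3, v4] (fun v => v) false))) := by
  set col : List Int := [v0, v1, v2, v3, v4] with hcol
  set s := PySem.List.sorted col (fun v => v) false with hs
  have hperm : s.Perm col := PySem.List.sorted_perm col (fun v => v) false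
  have hpw : s.Pairwise (· ≤ ·) := by
    have := PySem.List.sorted_pairwise (key := fun v : Int => v) (xs := col)
    simpa using this
  have hlen5 : s.length = 5 := by rw [hperm.length_eq]; rfl
  -- duplicate part: both sides test the same count property, counts agree under Perm
  have hdup : containsDuplicates col = pvAdjB s := by
    have hiff : containsDuplicates col = true ↔ pvAdjB s = true := by
      rw [cd_iff, adj_iff s hpw]
      constructor
      · rintro ⟨x, hx0, hc⟩; exact ⟨x, hx0, by rw [hperm.count_eq]; exact hc⟩
      · rintro ⟨x, hx0, hc⟩; exact ⟨x, hx0, by rw [← hperm.count_eq]; exact hc⟩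
    cases h1 : containsDuplicates col <;> cases h2 : pvAdjB s <;> simp_all
  -- range part: the extremes of the sorted column bound every element
  have hrng : checkIfNumIsFrom1ToN col =
      !decide (PySem.List.pyGetD s 0 0 < 0 ∨ PySem.List.pyGetD s 4 0 > 5) := by
    have hmem : ∀ v, v ∈ col ↔ v ∈ s := fun v => (hperm.mem_iff).symm
    clear hdup hs
    rcases s with _ | ⟨a, _ | ⟨b, _ | ⟨c, _ | ⟨d, _ | ⟨e, _ | ⟨f, t⟩⟩⟩⟩⟩⟩ <;>
      simp at hlen5
    have hordered : a ≤ b ∧ b ≤ c ∧ c ≤ d ∧ d ≤ e := by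
      simp [List.pairwise_cons] at hpw
      omega
    have hg0 : PySem.List.pyGetD [a, b, c, d, e] (0 : Int) 0 = a := rfl
    have hg4 : PySem.List.pyGetD [a, b, c, d, e] (4 : Int) 0 = e := rfl
    rw [hg0, hg4]
    have hval : checkIfNumIsFrom1ToN col = true ↔ ¬(a < 0 ∨ e > 5) := by
      rw [chk_iff]
      constructor
      · intro h
        have ha := h a ((hmem a).mpr (by simp))
        have he := h e ((hmem e).mpr (by simp))
        omega
      · intro h v hv
        rw [hmem] at hv
        simp at hv
        obtain ⟨h1, h2, h3, h4⟩ := hordered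
        rcases hv with rfl | rfl | rfl | rfl | rfl <;> omega
    cases h : checkIfNumIsFrom1ToN col
    · rw [h] at hval
      have hP : a < 0 ∨ e > 5 := by
        by_contra hq
        have := hval.mpr hq
        simp at this
      rw [decide_eq_true hP]
      rfl
    · have hnp := hval.mp h
      rw [decide_eq_false hnp]
      rfl
  rw [hdup, hrng]
  cases pvAdjB s <;> simp [Bool.and_comm]

-- B's per-column pair of early returns is a conjunction followed by the rest of the loop
theorem if_chain (p : Prop) [Decidable p] (q rest : Bool) :
    (if p then false else if q = true then false else rest) =
      ((!decide p && !q) && rest) := by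
  by_cases hp : p <;> cases q <;> simp [hp]

-- A's append loop builds the same column list as B's comprehension
theorem colA_eq_map (puzzle : List (List Int)) (c : Int) :
    pvColA puzzle c = (PySem.List.pyRange 0 5 1).map (fun r => pvCellA puzzle r c) := by
  rw [pvColA, PySem.List.foldl_append_singleton_eq_map]; simp

-- indexing the assembled list-of-columns `a` at literal positions
theorem getA (l0 l1 l2 l3 l4 : List Int) :
    PySem.List.pyGetD [l0, l1, l2, l3, l4] (0 : Int) [] = l0 ∧
    PySem.List.pyGetD [l0, l1, l2, l3, l4] (1 : Int) [] = l1 ∧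
    PySem.List.pyGetD [l0, l1, l2, l3, l4] (2 : Int) [] = l2 ∧
    PySem.List.pyGetD [l0, l1, l2, l3, l4] (3 : Int) [] = l3 ∧
    PySem.List.pyGetD [l0, l1, l2, l3, l4] (4 : Int) [] = l4 :=
  ⟨rfl, rfl, rfl, rfl, rfl⟩

-- ===== VERDICT (by name: the statement is the Claim_ definition above) =====
theorem check_columns_valid_spec : Claim_equal_check_columns_valid := by
  intro puzzle _ _
  unfold Spec_check_columns_valid check_columns_valid check_columns_valid_alt
  have hr : PySem.List.pyRange 0 5 1 = [0, 1, 2, 3, 4] := by decide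
  simp only [pvBGo, colA_eq_map, hr, List.map_cons, List.map_nil,
    List.nil_append, List.cons_append, pvCellA,
    (getA _ _ _ _ _).1, (getA _ _ _ _ _).2.1, (getA _ _ _ _ _).2.2.1,
    (getA _ _ _ _ _).2.2.2.1, (getA _ _ _ _ _).2.2.2.2]
  rw [if_chain, if_chain, if_chain, if_chain, if_chain,
    col_agree, col_agree, col_agree, col_agree, col_agree]
  simp [Bool.and_assoc]
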